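-- pv_equiv track=rewrite | github.com/RedStarWithGit/my-leetcode | problems/03143.py | maxPointsInsideSquare
-- ===== SOURCE A (Python) =====
-- import math
-- from typing import List
--
-- def maxPointsInsideSquare(points: List[List[int]], s: str) -> int:
--     max_length = math.inf
--     d = {}
--
--     for i in range(len(s)):
--         current_length = max(abs(points[i][0]), abs(points[i][1]))
--         if s[i] in d:
--             exists_length = d[s[i]]
--             if exists_length > current_length:
--                 d[s[i]] = current_length
--                 max_length = min(max_length, exists_length)
--             else:
--                 max_length = min(max_length, current_length)
--         else:
--             d[s[i]] = current_length
--     return sum([1 for i in d.values() if i < max_length])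
-- ===== SOURCE B (Python) =====
-- import math
-- from typing import List
--
-- def maxPointsInsideSquare(points: List[List[int]], s: str) -> int:
--     by_label = {}
--     for c, p in zip(s, points):
--         by_label.setdefault(c, []).append(max(abs(p[0]), abs(p[1])))
--     threshold = min((sorted(v)[1] for v in by_label.values() if len(v) >= 2),
--                     default=math.inf)
--     return sum(1 for v in by_label.values() if min(v) < threshold)
-- ===== Notes on version B (the rewrite author's own statement) =====
-- stated objective: simpler
-- what changed: A's single online pass that interleaves per-label minimum tracking with a running global minimum of second occurrences is replaced by a two-phase group-then-aggregate: group all Chebyshev distances per label, then take the threshold as the minimum over repeated labels of the second-smallest distance (sorted(v)[1], default inf), then count labels whose minimum distance is strictly below it.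
import Mathlib
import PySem

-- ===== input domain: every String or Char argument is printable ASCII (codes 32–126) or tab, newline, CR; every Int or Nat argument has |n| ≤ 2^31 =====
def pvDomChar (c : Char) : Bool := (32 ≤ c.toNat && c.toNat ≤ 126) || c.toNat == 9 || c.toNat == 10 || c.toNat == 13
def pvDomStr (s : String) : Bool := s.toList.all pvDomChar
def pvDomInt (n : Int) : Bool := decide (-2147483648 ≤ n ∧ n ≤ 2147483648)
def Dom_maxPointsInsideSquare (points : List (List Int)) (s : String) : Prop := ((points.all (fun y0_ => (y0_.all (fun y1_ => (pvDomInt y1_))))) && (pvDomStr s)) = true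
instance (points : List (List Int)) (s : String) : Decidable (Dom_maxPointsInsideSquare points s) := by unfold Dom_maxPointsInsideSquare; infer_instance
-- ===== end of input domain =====

-- B replaces A's single online pass (per-label running minimum + running global second-occurrence minimum)
-- by a two-phase group-then-aggregate: group all Chebyshev distances per label, then take the minimum of the
-- per-label second-smallest distances as the threshold, then count labels whose minimum beats it.  Objective: simpler.

-- math.inf together with min(·,·) is modelled as Option Int (none = inf); both Pythons use that pattern.
def pvOMin (m : Option Int) (x : Int) : Option Int :=
  some (match m with | none => x | some a => min a x)

-- ===== PORT A =====
def pvStepA (st : PySem.Dict Char Int × Option Int) (p : Char × Int) :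
    PySem.Dict Char Int × Option Int :=
  if st.1.contains p.1 then
    let ex := st.1.getD p.1 0
    if ex > p.2 then (st.1.insert p.1 p.2, pvOMin st.2 ex)
    else (st.1, pvOMin st.2 p.2)
  else (st.1.insert p.1 p.2, st.2)

def maxPointsInsideSquare (points : List (List Int)) (s : String) : Int :=
  let cs := s.toList
  let st := (PySem.List.pyRange 0 (cs.length : Int) 1).foldl
    (fun st i =>
      let row := PySem.List.pyGetD points i []
      pvStepA st (PySem.List.pyGetD cs i ' ',
        max |PySem.List.pyGetD row 0 0| |PySem.List.pyGetD row 1 0|))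
    (PySem.Dict.empty, none)
  ((st.1.values.countP (fun v =>
      match st.2 with | none => true | some m => decide (v < m)) : Nat) : Int)

-- ===== PORT B =====
def maxPointsInsideSquare_alt (points : List (List Int)) (s : String) : Int :=
  -- phase 1: group each label's Chebyshev distances (dict of lists, insertion order)
  let g := (s.toList.zip points).foldl
    (fun (g : PySem.Dict Char (List Int)) p =>
      g.modify p.1 [] (· ++ [max |PySem.List.pyGetD p.2 0 0| |PySem.List.pyGetD p.2 1 0|]))
    PySem.Dict.empty
  -- phase 2: threshold = min over labels with ≥ 2 points of the second-smallest distance (none = inf)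
  let thr := g.values.foldl
    (fun acc v => if 2 ≤ v.length then
        pvOMin acc (PySem.List.pyGetD (PySem.List.sorted v (fun y => y) false) 1 0)
      else acc) none
  -- phase 3: count labels whose minimum distance is strictly below the threshold
  ((g.values.countP (fun v =>
      match thr with
      | none => true
      | some t => decide (((PySem.List.min? v (fun y => y)).getD 0) < t)) : Nat) : Int)

-- ===== PRECONDITION & SPEC =====
-- A reads points[i][0] and points[i][1] for every i < len(s): it raises IndexError unless there are at
-- least len(s) points and each of those first len(s) rows has at least two coordinates.
def Pre_maxPointsInsideSquare (points : List (List Int)) (s : String) : Prop :=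
  s.toList.length ≤ points.length ∧
    ∀ r ∈ points.take s.toList.length, 2 ≤ r.length
instance (points : List (List Int)) (s : String) : Decidable (Pre_maxPointsInsideSquare points s) := by
  unfold Pre_maxPointsInsideSquare; infer_instance
def pvWitness_maxPointsInsideSquare : List (List Int) × String := ([[1, 2], [3, 4], [-2, 0]], "aba")

def Spec_maxPointsInsideSquare (points : List (List Int)) (s : String) (out : Int) : Prop := out = maxPointsInsideSquare_alt points s
instance (points : List (List Int)) (s : String) (out : Int) : Decidable (Spec_maxPointsInsideSquare points s out) := by unfold Spec_maxPointsInsideSquare; infer_instance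

-- ===== CLAIM (what is proved, stated in full; the proofs are below) =====
def Claim_equal_maxPointsInsideSquare : Prop := ∀ (points : List (List Int)) (s : String), Dom_maxPointsInsideSquare points s → Pre_maxPointsInsideSquare points s → Spec_maxPointsInsideSquare points s (maxPointsInsideSquare points s)

-- ===== LEMMAS AND PROOFS =====

theorem pvOMin_right_comm (m : Option Int) (x y : Int) :
    pvOMin (pvOMin m x) y = pvOMin (pvOMin m y) x := by
  cases m <;> simp [pvOMin, min_assoc, min_comm x y]

theorem pvOMin_min (m : Option Int) (a b : Int) :
    pvOMin m (min a b) = pvOMin (pvOMin m a) b := by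
  cases m <;> simp [pvOMin, min_assoc]

theorem foldl_pvOMin_pvOMin (l : List Int) (m : Option Int) (x : Int) :
    l.foldl pvOMin (pvOMin m x) = pvOMin (l.foldl pvOMin m) x := by
  induction l generalizing m with
  | nil => rfl
  | cons y t ih => simp only [List.foldl_cons, pvOMin_right_comm m x y, ih]

-- min of nonempty
def pvMinNE (v : List Int) : Int := match v with | [] => 0 | h :: t => t.foldl min h

theorem pvMinNE_append (v : List Int) (hv : v ≠ []) (x : Int) :
    pvMinNE (v ++ [x]) = min (pvMinNE v) x := by
  cases v with
  | nil => simp at hv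
  | cons h t => simp [pvMinNE, List.foldl_append]

theorem pvMinNE_le (v : List Int) (hv : v ≠ []) : ∀ y ∈ v, pvMinNE v ≤ y := by
  cases v with
  | nil => simp at hv
  | cons h t =>
    intro y hy
    have := PySem.List.foldl_min_le t h
    simp only [List.mem_cons] at hy
    rcases hy with rfl | hy
    · exact this.1
    · exact this.2 y hy

theorem pvMinNE_mem (v : List Int) (hv : v ≠ []) : pvMinNE v ∈ v := by
  cases v with
  | nil => simp at hv
  | cons h t =>
    rcases PySem.List.foldl_min_mem t h with h1 | h1
    · simp [pvMinNE, h1]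
    · simp [pvMinNE]; right; exact h1

def pvSec (v : List Int) : Int :=
  PySem.List.pyGetD (PySem.List.sorted v (fun y => y) false) 1 0

theorem sorted_head (v : List Int) (hv : v ≠ []) :
    ∃ t, PySem.List.sorted v (fun y => y) false = pvMinNE v :: t := by
  have hne : PySem.List.sorted v (fun y => y) false ≠ [] := by
    simp [PySem.List.sorted_eq_nil_iff, hv]
  obtain ⟨m, t, hmt⟩ := List.exists_cons_of_ne_nil hne
  have hle : ∀ y ∈ v, m ≤ y := PySem.List.key_head_sorted_le v (fun y => y) hmt
  have hmem : m ∈ v := by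
    have : m ∈ PySem.List.sorted v (fun y => y) false := by simp [hmt]
    exact (PySem.List.mem_sorted _ _ _ _).1 this
  have h1 : pvMinNE v ≤ m := pvMinNE_le v hv m hmem
  have h2 : m ≤ pvMinNE v := hle _ (pvMinNE_mem v hv)
  exact ⟨t, by rw [hmt, le_antisymm h1 h2]⟩

theorem sorted_append_singleton (v : List Int) (x : Int) :
    PySem.List.sorted (v ++ [x]) (fun y => y) false
      = PySem.List.insertBy (fun a b => decide (a < b)) x
          (PySem.List.sorted v (fun y => y) false) := by
  rw [PySem.List.sorted_eq_foldl_insertBy, PySem.List.sorted_eq_foldl_insertBy,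
    List.foldl_append]
  rfl

theorem pyGetD_one_cons (p q : Int) (r : List Int) :
    PySem.List.pyGetD (p :: q :: r) 1 0 = q := by
  simp [PySem.List.pyGetD, PySem.List.pyGet?, PySem.List.pyIdx?]

theorem insertBy_cons2 (a b x : Int) (t : List Int) :
    PySem.List.insertBy (fun p q => decide (p < q)) x (a :: b :: t)
      = if x < a then x :: a :: b :: t
        else if x < b then a :: x :: b :: t
        else a :: b :: PySem.List.insertBy (fun p q => decide (p < q)) x t := by
  simp [PySem.List.insertBy]
  split_ifs <;> rfl

theorem pvSec_append (v : List Int) (hv : v ≠ []) (x : Int) :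
    pvSec (v ++ [x])
      = if 2 ≤ v.length then min (pvSec v) (max (pvMinNE v) x)
        else max (pvMinNE v) x := by
  obtain ⟨t, ht⟩ := sorted_head v hv
  have hlen : v.length = t.length + 1 := by
    have := PySem.List.length_sorted v (fun y => y) false
    rw [ht] at this; simpa using this.symm
  rw [pvSec, sorted_append_singleton, ht]
  cases t with
  | nil =>
    simp only [List.length_nil] at hlen
    have h2 : ¬ 2 ≤ v.length := by omega
    simp only [PySem.List.insertBy, h2, if_false]
    split_ifs with h1 <;> simp only [decide_eq_true_eq] at h1 <;>
      rw [pyGetD_one_cons] <;> omega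
  | cons b u =>
    have h2 : 2 ≤ v.length := by simp [hlen]
    have hab : pvMinNE v ≤ b := by
      have hp := PySem.List.sorted_pairwise v (fun y => y)
      rw [ht] at hp
      exact (List.pairwise_cons.1 hp).1 b (by simp)
    have hsec : pvSec v = b := by rw [pvSec, ht, pyGetD_one_cons]
    rw [insertBy_cons2, hsec]
    simp only [h2, if_true]
    split_ifs with hxa hxb
    · rw [pyGetD_one_cons]; omega
    · rw [pyGetD_one_cons]; omega
    · rw [pyGetD_one_cons]; omega

theorem foldl_pvOMin_mid (a b : List Int) (m : Int) :
    ((a ++ m :: b).foldl pvOMin none) = pvOMin ((a ++ b).foldl pvOMin none) m := by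
  rw [List.foldl_append, List.foldl_append, List.foldl_cons,
    foldl_pvOMin_pvOMin]

def pvOcc (ps : List (Char × Int)) (c : Char) : List Int :=
  (ps.filter (fun p => p.1 == c)).map (·.2)

theorem pvOcc_append (l : List (Char × Int)) (p : Char × Int) (c : Char) :
    pvOcc (l ++ [p]) c = pvOcc l c ++ (if p.1 = c then [p.2] else []) := by
  simp only [pvOcc, List.filter_append, List.map_append]
  congr 1
  by_cases h : p.1 = c <;> simp [h]

theorem mem_map_fst_iff_pvOcc (l : List (Char × Int)) (c : Char) :
    c ∈ l.map (·.1) ↔ pvOcc l c ≠ [] := by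
  simp [pvOcc, List.filter_eq_nil_iff]

def pvSecondsOf (S : List Char) (ps : List (Char × Int)) : List Int :=
  (S.filter (fun c => 2 ≤ (pvOcc ps c).length)).map (fun c => pvSec (pvOcc ps c))

theorem pvSecondsOf_append (S T : List Char) (ps : List (Char × Int)) :
    pvSecondsOf (S ++ T) ps = pvSecondsOf S ps ++ pvSecondsOf T ps := by
  simp [pvSecondsOf, List.filter_append]

theorem pvSecondsOf_congr (S : List Char) (ps ps' : List (Char × Int))
    (h : ∀ c ∈ S, pvOcc ps' c = pvOcc ps c) :
    pvSecondsOf S ps' = pvSecondsOf S ps := by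
  unfold pvSecondsOf
  rw [List.filter_congr (fun c hc => by rw [h c hc])]
  exact List.map_congr_left (fun c hc => by rw [h c (List.mem_of_mem_filter hc)])

theorem stateA_spec (ps : List (Char × Int)) :
    (ps.foldl pvStepA (PySem.Dict.empty, none)).1.items
        = (PySem.Set.ofList (ps.map (·.1))).map (fun c => (c, pvMinNE (pvOcc ps c)))
      ∧ (ps.foldl pvStepA (PySem.Dict.empty, none)).2
        = (pvSecondsOf (PySem.Set.ofList (ps.map (·.1))) ps).foldl pvOMin none := by
  induction ps using List.reverseRecOn with
  | nil => exact ⟨rfl, rfl⟩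
  | append_singleton l p ih =>
    obtain ⟨ih1, ih2⟩ := ih
    set st := l.foldl pvStepA (PySem.Dict.empty, none) with hst
    set S := PySem.Set.ofList (l.map (·.1)) with hS
    have hnd : S.Nodup := PySem.Set.nodup_ofList _
    have hkeys : st.1.keys = S := by
      rw [PySem.Dict.keys, ih1, List.map_map]
      exact (List.map_congr_left (fun a _ => rfl)).trans (List.map_id _)
    have hfold : (l ++ [p]).foldl pvStepA (PySem.Dict.empty, none) = pvStepA st p := by
      rw [List.foldl_append]; rfl
    have hmapfst : (l ++ [p]).map (·.1) = l.map (·.1) ++ [p.1] := by simp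
    have hofl : PySem.Set.ofList ((l ++ [p]).map (·.1)) = PySem.Set.add S p.1 := by
      rw [hmapfst, PySem.Set.ofList_eq_foldl, List.foldl_append, hS,
        PySem.Set.ofList_eq_foldl]
      rfl
    by_cases hc : p.1 ∈ S
    · -- seen label
      have hcontains : st.1.contains p.1 = true := by
        rw [PySem.Dict.contains_eq_decide_mem_keys, hkeys]; simpa using hc
      have hoccne : pvOcc l p.1 ≠ [] :=
        (mem_map_fst_iff_pvOcc l p.1).1 ((PySem.Set.mem_ofList _ _).1 (hS ▸ hc))
      have hgetD : st.1.getD p.1 0 = pvMinNE (pvOcc l p.1) := by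
        apply PySem.Dict.getD_of_mem_items
        · rw [ih1]; exact List.mem_map_of_mem hc
        · rw [hkeys]; exact hnd
      have hS' : PySem.Set.ofList ((l ++ [p]).map (·.1)) = S := by
        rw [hofl]; simp [PySem.Set.add, PySem.Set.contains, hc]
      obtain ⟨u, w, huw⟩ := List.append_of_mem hc
      have hpu : p.1 ∉ u ∧ p.1 ∉ w := by
        have := hnd
        rw [huw] at this
        rcases List.nodup_append.1 this with ⟨_, h2, h3⟩
        refine ⟨fun h => h3 p.1 h p.1 (by simp) rfl, fun h => ?_⟩
        exact (List.pairwise_cons.1 h2).1 p.1 h rfl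
      have hoccnew : pvOcc (l ++ [p]) p.1 = pvOcc l p.1 ++ [p.2] := by
        rw [pvOcc_append]; simp
      have hocc_other : ∀ c, c ≠ p.1 → pvOcc (l ++ [p]) c = pvOcc l c := by
        intro c hcne
        rw [pvOcc_append, if_neg (fun h => hcne h.symm)]
        simp
      have hml : (pvStepA st p).2
          = pvOMin st.2 (max (pvMinNE (pvOcc l p.1)) p.2) := by
        simp only [pvStepA, hcontains, if_true]
        by_cases hgt : st.1.getD p.1 0 > p.2
        · simp only [hgt, if_true]
          rw [hgetD] at hgt ⊢
          congr 1
          omega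
        · simp only [hgt, if_false]
          rw [hgetD] at hgt
          congr 1
          omega
      constructor
      · -- items
        rw [hfold, hS']
        simp only [pvStepA, hcontains, if_true]
        by_cases hgt : st.1.getD p.1 0 > p.2
        · simp only [hgt, if_true]
          rw [PySem.Dict.items_insert_of_contains _ _ hcontains, ih1,
            List.map_map]
          apply List.map_congr_left
          intro a ha
          simp only [Function.comp_apply]
          by_cases hap : a = p.1
          · subst hap
            rw [hgetD] at hgt
            simp only [BEq.rfl, if_true]
            rw [pvOcc_append, if_pos rfl, pvMinNE_append _ hoccne]
            have : min (pvMinNE (pvOcc l p.1)) p.2 = p.2 := by omega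
            rw [this]
          · rw [if_neg (by simpa using hap), hocc_other a hap]
        · simp only [hgt, if_false]
          rw [ih1]
          apply List.map_congr_left
          intro a ha
          by_cases hap : a = p.1
          · subst hap
            rw [hgetD] at hgt
            rw [pvOcc_append, if_pos rfl, pvMinNE_append _ hoccne]
            have : min (pvMinNE (pvOcc l p.1)) p.2 = pvMinNE (pvOcc l p.1) := by omega
            rw [this]
          · rw [hocc_other a hap]
      · -- running second-minimum
        rw [hfold, hS', hml, ih2, huw]
        have hcw : (p.1 :: w) = [p.1] ++ w := rfl
        rw [hcw, pvSecondsOf_append, pvSecondsOf_append,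
          pvSecondsOf_append, pvSecondsOf_append]
        have hu : pvSecondsOf u (l ++ [p]) = pvSecondsOf u l :=
          pvSecondsOf_congr _ _ _ (fun c hcu =>
            hocc_other c (fun h => hpu.1 (h ▸ hcu)))
        have hw : pvSecondsOf w (l ++ [p]) = pvSecondsOf w l :=
          pvSecondsOf_congr _ _ _ (fun c hcw' =>
            hocc_other c (fun h => hpu.2 (h ▸ hcw')))
        rw [hu, hw]
        have hone : pvSecondsOf [p.1] (l ++ [p])
            = [pvSec (pvOcc l p.1 ++ [p.2])] := by
          unfold pvSecondsOf
          have h1 : 1 ≤ (pvOcc l p.1).length := by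
            cases h : pvOcc l p.1 with
            | nil => exact absurd h hoccne
            | cons a t => simp
          simp [hoccnew, h1]
        rw [hone, pvSec_append _ hoccne]
        by_cases h2 : 2 ≤ (pvOcc l p.1).length
        · have hold : pvSecondsOf [p.1] l = [pvSec (pvOcc l p.1)] := by
            unfold pvSecondsOf; simp [h2]
          rw [hold, if_pos h2]
          have lhs := foldl_pvOMin_mid (pvSecondsOf u l)
            (pvSecondsOf w l) (min (pvSec (pvOcc l p.1)) (max (pvMinNE (pvOcc l p.1)) p.2))
          have rhs := foldl_pvOMin_mid (pvSecondsOf u l)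
            (pvSecondsOf w l) (pvSec (pvOcc l p.1))
          simp only [List.singleton_append] at lhs rhs ⊢
          rw [lhs, rhs, pvOMin_min]
        · have hold : pvSecondsOf [p.1] l = [] := by
            unfold pvSecondsOf; simp [h2]
          rw [hold, if_neg h2]
          have lhs := foldl_pvOMin_mid (pvSecondsOf u l)
            (pvSecondsOf w l) (max (pvMinNE (pvOcc l p.1)) p.2)
          simp only [List.singleton_append,
            List.nil_append] at lhs ⊢
          rw [lhs]
    · -- fresh label
      have hcontains : st.1.contains p.1 = false := by
        rw [PySem.Dict.contains_eq_decide_mem_keys, hkeys]; simpa using hc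
      have hocc0 : pvOcc l p.1 = [] := by
        by_contra h
        exact hc ((PySem.Set.mem_ofList _ _).2
          ((mem_map_fst_iff_pvOcc l p.1).2 h))
      have hS' : PySem.Set.ofList ((l ++ [p]).map (·.1)) = S ++ [p.1] := by
        rw [hofl]; simp [PySem.Set.add, PySem.Set.contains, hc]
      have hocc_other : ∀ c, c ≠ p.1 → pvOcc (l ++ [p]) c = pvOcc l c := by
        intro c hcne
        rw [pvOcc_append, if_neg (fun h => hcne h.symm)]
        simp
      constructor
      · rw [hfold, hS']
        simp only [pvStepA, hcontains, Bool.false_eq_true, if_false]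
        rw [PySem.Dict.items_insert_of_not_contains _ _ hcontains, ih1,
          List.map_append]
        congr 1
        · apply List.map_congr_left
          intro a ha
          rw [hocc_other a (fun h => hc (h ▸ ha))]
        · rw [List.map_singleton, pvOcc_append, if_pos rfl, hocc0]
          rfl
      · rw [hfold, hS']
        simp only [pvStepA, hcontains, Bool.false_eq_true, if_false]
        rw [ih2, pvSecondsOf_append]
        have hone : pvSecondsOf [p.1] (l ++ [p]) = [] := by
          unfold pvSecondsOf
          simp [pvOcc_append, hocc0]
        have hSS : pvSecondsOf S (l ++ [p]) = pvSecondsOf S l :=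
          pvSecondsOf_congr _ _ _ (fun c hcS =>
            hocc_other c (fun h => hc (h ▸ hcS)))
        rw [hone, hSS, List.append_nil]

def pvPairs (points : List (List Int)) (s : String) : List (Char × Int) :=
  (s.toList.zip points).map
    (fun q => (q.1, max |PySem.List.pyGetD q.2 0 0| |PySem.List.pyGetD q.2 1 0|))

theorem foldl_stepA_eq (points : List (List Int)) (s : String)
    (h1 : s.toList.length ≤ points.length)
    (init : PySem.Dict Char Int × Option Int) :
    (PySem.List.pyRange 0 (s.toList.length : Int) 1).foldl
      (fun st i =>
        pvStepA st (PySem.List.pyGetD s.toList i ' ',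
          max |PySem.List.pyGetD (PySem.List.pyGetD points i []) 0 0|
              |PySem.List.pyGetD (PySem.List.pyGetD points i []) 1 0|)) init
      = (pvPairs points s).foldl pvStepA init := by
  have hzip : s.toList.zip points
      = (List.range s.toList.length).map
          (fun i => (s.toList.getD i ' ', points.getD i [])) := by
    apply List.ext_getElem
    · simp only [List.length_zip, List.length_map, List.length_range]; omega
    · intro i hi hi2
      have hilt : i < s.toList.length := by
        simp only [List.length_zip] at hi; omega
      have hip : i < points.length := by omega
      rw [List.getElem_zip, List.getElem_map, List.getElem_range,
        List.getD_eq_getElem _ _ hilt, List.getD_eq_getElem _ _ hip]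
  rw [pvPairs, hzip, List.map_map, List.foldl_map,
    PySem.List.pyRange_zero_natCast, List.foldl_map]
  apply PySem.List.foldl_congr_mem
  intro acc i hi
  simp only [PySem.List.pyGetD_natCast, Function.comp_apply]

theorem ports_eq (points : List (List Int)) (s : String)
    (h1 : s.toList.length ≤ points.length) :
    maxPointsInsideSquare points s = maxPointsInsideSquare_alt points s := by
  obtain ⟨hA1, hA2⟩ := stateA_spec (pvPairs points s)
  set ps := pvPairs points s with hps
  set S := PySem.Set.ofList (ps.map (·.1)) with hS
  -- B's grouping dict
  set g := ps.foldl
    (fun (d : PySem.Dict Char (List Int)) p =>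
      d.modify p.1 [] (fun v => v ++ [p.2])) PySem.Dict.empty with hg
  have hgB : (s.toList.zip points).foldl
      (fun (d : PySem.Dict Char (List Int)) p =>
        d.modify p.1 []
          (· ++ [max |PySem.List.pyGetD p.2 0 0| |PySem.List.pyGetD p.2 1 0|]))
      PySem.Dict.empty = g := by
    rw [hg, hps, pvPairs, List.foldl_map]
  have hkeys : g.keys = S := by
    rw [hg, PySem.Dict.keys_foldl_modify_key ps (·.1) []
      (fun _ p => fun v => v ++ [p.2]) PySem.Dict.empty]
    simp [PySem.Set.update, PySem.Set.ofList_eq_foldl, PySem.Dict.keys_empty, hS]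
  have hnodup : g.keys.Nodup := by
    rw [hkeys]; exact PySem.Set.nodup_ofList _
  have hgetD : ∀ c, g.getD c [] = pvOcc ps c := by
    intro c
    rw [hg]
    have := PySem.Dict.getD_foldl_modify_append ps PySem.Dict.empty c
    rw [PySem.Dict.getD_empty] at this
    simpa [pvOcc] using this
  have hvalues : g.values = S.map (fun c => pvOcc ps c) := by
    rw [PySem.Dict.values, PySem.Dict.items_eq_map_keys g hnodup [], hkeys,
      List.map_map]
    exact List.map_congr_left (fun c _ => hgetD c)
  -- A's dict values
  have hAvalues : ((pvPairs points s).foldl pvStepA (PySem.Dict.empty, none)).1.values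
      = S.map (fun c => pvMinNE (pvOcc ps c)) := by
    rw [PySem.Dict.values, hA1, List.map_map]
    rfl
  -- the two thresholds agree
  have hthr : g.values.foldl
      (fun acc v => if 2 ≤ v.length then
          pvOMin acc (PySem.List.pyGetD (PySem.List.sorted v (fun y => y) false) 1 0)
        else acc) none
      = (ps.foldl pvStepA (PySem.Dict.empty, none)).2 := by
    rw [hA2, hvalues, List.foldl_map,
      PySem.List.foldl_ite_eq_foldl_filter
        (p := fun c => 2 ≤ (pvOcc ps c).length)
        (f := fun acc c => pvOMin acc
          (PySem.List.pyGetD (PySem.List.sorted (pvOcc ps c) (fun y => y) false) 1 0)),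
      pvSecondsOf, List.foldl_map]
    rfl
  -- occurrence lists of labels in S are nonempty
  have hoccne : ∀ c ∈ S, pvOcc ps c ≠ [] := by
    intro c hcS
    exact (mem_map_fst_iff_pvOcc ps c).1 ((PySem.Set.mem_ofList _ _).1 (hS ▸ hcS))
  -- assemble
  rw [maxPointsInsideSquare, maxPointsInsideSquare_alt]
  simp only
  rw [foldl_stepA_eq points s h1, hgB, hthr, hAvalues, hvalues,
    List.countP_map, List.countP_map]
  rw [← hps]
  congr 1
  apply List.countP_congr
  intro c hcS
  simp only [Function.comp_apply]
  obtain ⟨h0, t0, hocc⟩ := List.exists_cons_of_ne_nil (hoccne c hcS)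
  cases hML : (ps.foldl pvStepA (PySem.Dict.empty, none)).2 with
  | none => simp
  | some m =>
    simp only [decide_eq_true_eq]
    rw [hocc, PySem.List.min?_id_cons, Option.getD_some, pvMinNE]

-- ===== VERDICT (by name: the statement is the Claim_ definition above) =====
theorem maxPointsInsideSquare_spec : Claim_equal_maxPointsInsideSquare := by
  intro points s _hdom hpre
  unfold Spec_maxPointsInsideSquare
  exact ports_eq points s hpre.1
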